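-- pv_equiv track=rewrite | github.com/tihon2289/IGI_LAB1 | IGI/LR3/task5_lists.py | get_min_abs_index
-- ===== SOURCE A (Python) =====
-- def get_min_abs_index(lst: list) -> int:
--     """Finds the index of the minimum by absolute value element."""
--     if not lst:
--         return 0
--
--     min_abs_val = abs(lst[0])
--     min_idx = 0
--
--     for i in range(1, len(lst)):
--         if abs(lst[i]) < min_abs_val:
--             min_abs_val = abs(lst[i])
--             min_idx = i
--
--     return min_idx
-- ===== SOURCE B (Python) =====
-- def get_min_abs_index(lst: list) -> int:
--     """Finds the index of the minimum by absolute value element."""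
--     if not lst:
--         return 0
--     abs_list = [abs(x) for x in lst]
--     return abs_list.index(min(abs_list))
-- ===== Notes on version B (the rewrite author's own statement) =====
-- stated objective: simpler
-- what changed: Replaces the one-pass running-minimum-index loop over indices with a two-pass table-then-search decomposition: build the list of absolute values, take its min, and return the first index of that min.
import Mathlib
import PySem

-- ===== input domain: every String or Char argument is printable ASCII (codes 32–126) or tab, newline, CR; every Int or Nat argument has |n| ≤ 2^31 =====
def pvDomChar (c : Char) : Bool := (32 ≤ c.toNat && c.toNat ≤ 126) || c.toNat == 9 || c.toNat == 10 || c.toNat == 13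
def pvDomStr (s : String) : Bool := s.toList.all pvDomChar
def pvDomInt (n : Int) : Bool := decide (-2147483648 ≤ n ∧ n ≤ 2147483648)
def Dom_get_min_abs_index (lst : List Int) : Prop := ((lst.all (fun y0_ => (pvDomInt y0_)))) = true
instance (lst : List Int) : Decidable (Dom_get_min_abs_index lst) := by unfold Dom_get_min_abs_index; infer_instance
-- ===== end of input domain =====

-- B replaces A's one-pass running-minimum-index loop by a two-pass decomposition:
-- map to absolute values, take min, return its first index (objective: simpler).

-- ===== PORT A =====
-- literal port: running (min_abs_val, min_idx) over i in range(1, len(lst))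
def get_min_abs_index (lst : List Int) : Int :=
  if lst = [] then 0
  else
    let st := (PySem.List.pyRange 1 lst.length 1).foldl
      (fun st i =>
        if |PySem.List.pyGetD lst i 0| < st.1 then (|PySem.List.pyGetD lst i 0|, i) else st)
      (|PySem.List.pyGetD lst 0 0|, (0 : Int))
    st.2

-- ===== PORT B =====
-- literal port of Source B: abs_list = [abs(x) for x in lst]; abs_list.index(min(abs_list))
def get_min_abs_index_alt (lst : List Int) : Int :=
  if lst = [] then 0
  else
    let abs_list := lst.map (fun x => |x|)
    match PySem.List.min? abs_list (fun y => y) with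
    | none => 0              -- unreachable: abs_list nonempty
    | some m =>
      match PySem.List.index? abs_list m with
      | some k => (k : Int)
      | none => 0            -- unreachable: m ∈ abs_list

-- ===== PRECONDITION & SPEC =====
def Spec_get_min_abs_index (lst : List Int) (out : Int) : Prop := out = get_min_abs_index_alt lst
instance (lst : List Int) (out : Int) : Decidable (Spec_get_min_abs_index lst out) := by unfold Spec_get_min_abs_index; infer_instance

-- ===== CLAIM (what is proved, stated in full; the proofs are below) =====
def Claim_equal_get_min_abs_index : Prop := ∀ (lst : List Int), Dom_get_min_abs_index lst → Spec_get_min_abs_index lst (get_min_abs_index lst)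

-- ===== LEMMAS AND PROOFS =====

-- Invariant of A's fold: it returns (M, k) where M is the minimum of the absolute
-- values and k is the first index attaining it (as index? of the abs list).
lemma foldA_invariant (x : Int) (t : List Int) :
    ∃ (k : Nat),
      ((PySem.List.pyRange 1 ((x :: t).length : Int) 1).foldl
        (fun st i =>
          if |PySem.List.pyGetD (x :: t) i 0| < st.1 then (|PySem.List.pyGetD (x :: t) i 0|, i) else st)
        (|PySem.List.pyGetD (x :: t) 0 0|, (0 : Int)))
      = ((t.map (fun y => |y|)).foldl min |x|, (k : Int)) ∧
      PySem.List.index? ((x :: t).map (fun y => |y|)) ((t.map (fun y => |y|)).foldl min |x|) = some k := by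
  induction t using List.reverseRecOn with
  | nil =>
    refine ⟨0, ?_, ?_⟩
    · have h0 : PySem.List.pyRange 1 (((x :: ([] : List Int)).length : Int)) 1 = [] :=
        PySem.List.pyRange_one_eq_nil (by simp)
      rw [h0]
      simp [PySem.List.pyGetD_zero_cons]
    · simp
  | append_singleton t y ih =>
    obtain ⟨k, hfold, hidx⟩ := ih
    set M := (t.map (fun y => |y|)).foldl min |x| with hM
    have hlen : ((x :: (t ++ [y])).length : Int) = ((x :: t).length : Int) + 1 := by
      simp
    have hsplit : PySem.List.pyRange 1 ((x :: (t ++ [y])).length : Int) 1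
        = PySem.List.pyRange 1 ((x :: t).length : Int) 1 ++ [((x :: t).length : Int)] := by
      rw [hlen, PySem.List.pyRange_one_succ_right (by simp)]
    -- pyGetD agrees on the common prefix for indices in the old range
    have hget : ∀ (acc : Int × Int), ∀ i ∈ PySem.List.pyRange 1 ((x :: t).length : Int) 1,
        (fun (st : Int × Int) i =>
          if |PySem.List.pyGetD (x :: (t ++ [y])) i 0| < st.1 then (|PySem.List.pyGetD (x :: (t ++ [y])) i 0|, i) else st) acc i
        = (fun (st : Int × Int) i =>
          if |PySem.List.pyGetD (x :: t) i 0| < st.1 then (|PySem.List.pyGetD (x :: t) i 0|, i) else st) acc i := by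
      intro acc i hi
      rw [PySem.List.mem_pyRange_one] at hi
      obtain ⟨h1, h2⟩ := hi
      have hgi : PySem.List.pyGetD (x :: (t ++ [y])) i 0 = PySem.List.pyGetD (x :: t) i 0 := by
        rw [PySem.List.pyGetD_eq_getElem _ _ (by omega) (by simp at h2 ⊢; omega),
            PySem.List.pyGetD_eq_getElem _ _ (by omega) h2]
        exact List.getElem_append_left (as := x :: t) (bs := [y]) (h' := by simp at h2 ⊢; omega) (by simp at h2 ⊢; omega)
      simp only [hgi]
    have hcongr :
        ((PySem.List.pyRange 1 ((x :: t).length : Int) 1).foldl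
          (fun (st : Int × Int) i =>
            if |PySem.List.pyGetD (x :: (t ++ [y])) i 0| < st.1 then (|PySem.List.pyGetD (x :: (t ++ [y])) i 0|, i) else st)
          (|PySem.List.pyGetD (x :: (t ++ [y])) 0 0|, (0 : Int)))
        = (M, (k : Int)) := by
      have hinit : |PySem.List.pyGetD (x :: (t ++ [y])) 0 0| = |PySem.List.pyGetD (x :: t) 0 0| := by
        rw [PySem.List.pyGetD_zero_cons, PySem.List.pyGetD_zero_cons]
      rw [hinit, PySem.List.foldl_congr_mem _ _ _ _ hget, hfold]
    -- the last element of the extended list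
    have hgetlast : PySem.List.pyGetD (x :: (t ++ [y])) ((x :: t).length : Int) 0 = y := by
      rw [show (x :: (t ++ [y])) = (x :: t) ++ [y] from by simp]
      rw [PySem.List.pyGetD_eq_getElem _ _ (Int.natCast_nonneg _) (by simp)]
      simp
    have habslen : ((x :: t).map (fun y => |y|)).length = (x :: t).length := by simp
    have hMmem : M ∈ (x :: t).map (fun y => |y|) := by
      have h := PySem.List.index?_isSome_iff ((x :: t).map (fun y => |y|)) M
      rw [hidx] at h
      simpa using h
    have hMle : ∀ z ∈ (x :: t).map (fun y => |y|), M ≤ z := by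
      intro z hz
      simp only [List.map_cons, List.mem_cons] at hz
      rcases hz with rfl | hz
      · exact (PySem.List.foldl_min_le _ _).1
      · exact (PySem.List.foldl_min_le _ _).2 z hz
    rw [hsplit, List.foldl_append]
    simp only [List.foldl_cons, List.foldl_nil, hcongr, hgetlast]
    have hnewmin : ((t ++ [y]).map (fun y => |y|)).foldl min |x| = min M |y| := by
      simp [List.foldl_append, hM]
    by_cases hlt : |y| < M
    · refine ⟨(x :: t).length, ?_, ?_⟩
      · simp only [if_pos hlt, hnewmin, min_eq_right (le_of_lt hlt)]
      · have hnotmem : |y| ∉ (x :: t).map (fun y => |y|) := fun hmem =>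
          absurd (hMle _ hmem) (by omega)
        rw [hnewmin, min_eq_right (le_of_lt hlt),
            show (x :: (t ++ [y])).map (fun y => |y|) = ((x :: t).map (fun y => |y|)) ++ [|y|] from by simp]
        rw [PySem.List.index?_append_singleton_self _ _ hnotmem, habslen]
    · refine ⟨k, ?_, ?_⟩
      · simp only [if_neg hlt, hnewmin, min_eq_left (not_lt.mp hlt)]
      · rw [hnewmin, min_eq_left (not_lt.mp hlt),
            show (x :: (t ++ [y])).map (fun y => |y|) = ((x :: t).map (fun y => |y|)) ++ [|y|] from by simp]
        rw [PySem.List.index?_append_of_mem _ hMmem, hidx]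

-- ===== VERDICT (by name: the statement is the Claim_ definition above) =====
theorem get_min_abs_index_spec : Claim_equal_get_min_abs_index := by
  intro lst _
  unfold Spec_get_min_abs_index get_min_abs_index get_min_abs_index_alt
  cases lst with
  | nil => simp
  | cons x t =>
    obtain ⟨k, hfold, hidx⟩ := foldA_invariant x t
    have hmin : PySem.List.min? ((x :: t).map (fun y => |y|)) (fun y => y)
        = some ((t.map (fun y => |y|)).foldl min |x|) := by
      rw [show (x :: t).map (fun y => |y|) = |x| :: t.map (fun y => |y|) by simp]
      exact PySem.List.min?_id_cons _ _
    simp only [if_neg (List.cons_ne_nil x t), hmin, hidx]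
    rw [show ((x :: t).length : Int) = ((x :: t).length : Int) by rfl] at hfold
    simp only [hfold]
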